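-- pv_equiv track=rewrite | github.com/martin-varbanov96/code_exercies | atcoder/192/abc192_C.py | solve
-- ===== SOURCE A (Python) =====
-- def solve(N, K):
--     if(K == 0):
--         return N
--     f = N
--     for _ in range(K):
--         numbers = list(map(int, str(f)))
--         numbers.sort(reverse=True)
--         g_1_string ="".join(map(str, numbers))
--         g_1 = int(g_1_string)
--         g_2 = int(g_1_string[::-1])
--         f = g_1 - g_2
--
--     return f
-- ===== SOURCE B (Python) =====
-- def _step(f):
--     numbers = sorted(map(int, str(f)), reverse=True)
--     s = "".join(map(str, numbers))
--     return int(s) - int(s[::-1])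
--
--
-- def solve(N, K):
--     if K <= 0:
--         return N
--     seen = {}
--     f = N
--     i = 0
--     while i < K:
--         j = seen.get(f)
--         if j is not None:
--             cyc = i - j
--             rem = (K - i) % cyc
--             for _ in range(rem):
--                 f = _step(f)
--             return f
--         seen[f] = i
--         f = _step(f)
--         i += 1
--     return f
-- ===== Notes on version B (the rewrite author's own statement) =====
-- stated objective: faster
-- what changed: B replaces A's K-step iteration of the digit sort/subtract transform with cycle detection (a dict of seen values) and skips the remaining iterations via modulo of the cycle length.
import Mathlib
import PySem

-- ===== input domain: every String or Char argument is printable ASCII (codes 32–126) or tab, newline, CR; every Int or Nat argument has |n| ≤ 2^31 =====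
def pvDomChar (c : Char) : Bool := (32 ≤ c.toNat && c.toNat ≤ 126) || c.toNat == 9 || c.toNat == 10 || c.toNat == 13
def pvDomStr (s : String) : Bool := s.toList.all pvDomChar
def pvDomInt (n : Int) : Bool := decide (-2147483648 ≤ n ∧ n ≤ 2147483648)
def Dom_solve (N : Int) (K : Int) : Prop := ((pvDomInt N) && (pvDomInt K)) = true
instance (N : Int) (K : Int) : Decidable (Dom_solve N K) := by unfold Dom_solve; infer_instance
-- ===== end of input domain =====

-- B replaces A's K-step loop by cycle detection with a seen-dict and skips the rest via modulo (faster for large K).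

-- ===== PORT A =====
-- the body of A's loop, factored as a helper (both ports apply this same transform);
-- int(c) / int(s) are ported with PySem.Int.ofStr?; the .getD 0 is unreachable on Pre_ (digits of a nonnegative int)
def step (f : Int) : Int :=
  let numbers := (PySem.Int.toStr f).toList.map (fun c => (PySem.Int.ofStr? (String.mk [c])).getD 0)
  let numbers := PySem.List.sorted numbers (fun x => x) true
  let g1s := PySem.Str.join "" (numbers.map PySem.Int.toStr)
  let g1 := (PySem.Int.ofStr? g1s).getD 0
  let g2 := (PySem.Int.ofStr? (String.mk g1s.toList.reverse)).getD 0   -- g_1_string[::-1]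
  g1 - g2

def solve (N : Int) (K : Int) : Int :=
  if K == 0 then N
  else (PySem.List.pyRange 0 K 1).foldl (fun f _ => step f) N

-- ===== PORT B =====
-- the while loop of Source B; fuel = K - i (the loop runs at most K times)
def loopB (K : Int) (fuel : Nat) (seen : PySem.Dict Int Int) (f : Int) (i : Int) : Int :=
  match fuel with
  | 0 => f
  | Nat.succ fuel' =>
    match seen.get? f with
    | some j =>
      let cyc := i - j
      let rem := PySem.Int.mod (K - i) cyc
      (PySem.List.pyRange 0 rem 1).foldl (fun g _ => step g) f
    | none => loopB K fuel' (seen.insert f i) (step f) (i + 1)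

def solve_alt (N : Int) (K : Int) : Int :=
  if K ≤ 0 then N
  else loopB K K.toNat PySem.Dict.empty N 0

-- ===== PRECONDITION & SPEC =====
-- Pre_ excludes N < 0 with K > 0: there str(f) contains '-' and A's int('-') raises ValueError.
def Pre_solve (N : Int) (K : Int) : Prop := K ≤ 0 ∨ 0 ≤ N
instance (N : Int) (K : Int) : Decidable (Pre_solve N K) := by unfold Pre_solve; infer_instance
def pvWitness_solve : Int × Int := (314, 3)

def Spec_solve (N : Int) (K : Int) (out : Int) : Prop := out = solve_alt N K
instance (N : Int) (K : Int) (out : Int) : Decidable (Spec_solve N K out) := by unfold Spec_solve; infer_instance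

-- ===== CLAIM (what is proved, stated in full; the proofs are below) =====
def Claim_equal_solve : Prop := ∀ (N : Int) (K : Int), Dom_solve N K → Pre_solve N K → Spec_solve N K (solve N K)

-- ===== LEMMAS AND PROOFS =====

-- folding a constant-ignoring step over a list iterates it length-many times
theorem foldl_const_step (l : List Int) (f : Int) :
    l.foldl (fun g _ => step g) f = step^[l.length] f := by
  induction l generalizing f with
  | nil => rfl
  | cons x xs ih => simp [List.foldl, ih, Function.iterate_succ_apply]

theorem foldl_range_step (m : Int) (f : Int) :
    (PySem.List.pyRange 0 m 1).foldl (fun g _ => step g) f = step^[m.toNat] f := by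
  rw [foldl_const_step]
  simp [PySem.List.length_pyRange_one]

theorem solve_eq_iterate (N K : Int) : solve N K = step^[K.toNat] N := by
  unfold solve
  by_cases h : K = 0
  · simp [h]
  · have : (K == 0) = false := by simp [h]
    rw [this]
    simp only [Bool.false_eq_true, if_false]
    exact foldl_range_step K N

-- periodicity: one period
theorem iterate_period (N : Int) (s p : Nat) (hp : step^[s + p] N = step^[s] N) :
    ∀ m, s ≤ m → step^[m + p] N = step^[m] N := by
  intro m hm
  obtain ⟨d, rfl⟩ := Nat.exists_eq_add_of_le hm
  have h1 : s + d + p = d + (s + p) := by omega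
  have h2 : s + d = d + s := by omega
  rw [h1, Function.iterate_add_apply step d (s + p) N, hp, h2, Function.iterate_add_apply]

-- periodicity: any multiple of the period
theorem iterate_period_mul (N : Int) (s p : Nat) (hp : step^[s + p] N = step^[s] N) :
    ∀ q m, s ≤ m → step^[m + q * p] N = step^[m] N := by
  intro q
  induction q with
  | zero => intro m _; simp
  | succ q ih =>
    intro m hm
    have h1 : m + (q + 1) * p = (m + q * p) + p := by ring
    rw [h1, iterate_period N s p hp (m + q * p) (by omega), ih m hm]

-- the invariant of B's while loop
theorem loopB_eq (N K : Int) :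
    ∀ (fuel : Nat) (seen : PySem.Dict Int Int) (f i : Int),
      0 ≤ i → i ≤ K → fuel = (K - i).toNat →
      f = step^[i.toNat] N →
      (∀ v j, seen.get? v = some j → 0 ≤ j ∧ j < i ∧ step^[j.toNat] N = v) →
      loopB K fuel seen f i = step^[K.toNat] N := by
  intro fuel
  induction fuel with
  | zero =>
    intro seen f i hi0 hiK hfuel hf _
    have : i = K := by omega
    subst this
    simpa [loopB] using hf
  | succ fuel' ih =>
    intro seen f i hi0 hiK hfuel hf hseen
    have hiK' : i < K := by omega
    unfold loopB
    cases hget : seen.get? f with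
    | some j =>
      obtain ⟨hj0, hji, hjN⟩ := hseen f j hget
      simp only
      rw [foldl_range_step]
      -- names
      set cyc : Int := i - j with hcyc
      have hcycpos : 0 < cyc := by omega
      set rem : Int := PySem.Int.mod (K - i) cyc with hrem
      have hrem0 : 0 ≤ rem := PySem.Int.mod_nonneg _ hcycpos
      set q : Int := PySem.Int.floordiv (K - i) cyc with hq
      have hdecomp : q * cyc + rem = K - i := PySem.Int.floordiv_mul_add_mod (K - i) cyc
      have hq0 : 0 ≤ q := by
        rw [hq, PySem.Int.floordiv_eq_ediv_of_pos hcycpos]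
        exact Int.ediv_nonneg (by omega) (by omega)
      -- Nat versions
      have hperiod : step^[j.toNat + cyc.toNat] N = step^[j.toNat] N := by
        have : j.toNat + cyc.toNat = i.toNat := by omega
        rw [this, ← hf, hjN]
      have hKnat : K.toNat = (i.toNat + rem.toNat) + q.toNat * cyc.toNat := by
        have hcast : ((q.toNat * cyc.toNat : Nat) : Int) = q * cyc := by
          push_cast
          rw [Int.toNat_of_nonneg hq0, Int.toNat_of_nonneg (le_of_lt hcycpos)]
        omega
      rw [hf, ← Function.iterate_add_apply]
      rw [hKnat, iterate_period_mul N j.toNat cyc.toNat hperiod q.toNat (i.toNat + rem.toNat) (by omega)]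
      congr 1
      omega
    | none =>
      simp only
      apply ih
      · omega
      · omega
      · omega
      · rw [hf, show (i + 1).toNat = i.toNat + 1 from by omega, Function.iterate_succ_apply']
      · intro v j' hv
        rw [PySem.Dict.get?_insert] at hv
        split_ifs at hv with hvf
        · injection hv with hv
          subst hvf
          exact ⟨by omega, by omega, by rw [show j'.toNat = i.toNat from by omega]; exact hf.symm⟩
        · obtain ⟨h1, h2, h3⟩ := hseen v j' hv
          exact ⟨h1, by omega, h3⟩

-- ===== VERDICT (by name: the statement is the Claim_ definition above) =====
theorem solve_spec : Claim_equal_solve := by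
  intro N K _ _
  unfold Spec_solve solve_alt
  by_cases hK : K ≤ 0
  · rw [if_pos hK, solve_eq_iterate]
    have : K.toNat = 0 := by omega
    simp [this]
  · rw [if_neg hK, solve_eq_iterate]
    exact (loopB_eq N K K.toNat PySem.Dict.empty N 0 le_rfl (by omega) (by omega)
      (by simp) (by intro v j h; simp [PySem.Dict.get?_empty] at h)).symm
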